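-- pv_equiv track=rewrite | github.com/tinymins/MY | !src-dist/sort_ini.py | sort_lines
-- ===== SOURCE A (Python) =====
-- from typing import List
--
-- def sort_lines(lines: List[str]) -> List[str]:
--     """
--     对单个节内的行进行排序。
--
--     参数:
--         lines: 当前节的所有行列表。
--
--     返回:
--         排序后的行列表。
--     """
--     # 固定顺序的行：仅包含以 "._WndType=" 或 "._Parent=" 开头的行
--     fixed_order: List[str] = [
--         line
--         for line in lines
--         if line.startswith("._WndType=") or line.startswith("._Parent=")
--     ]
--
--     # 需要排序的其他非空行（排除已在固定顺序中的行）
--     other_lines: List[str] = [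
--         line for line in lines if line not in fixed_order and line.strip()
--     ]
--
--     # 根据去除首尾空白后的内容排序（区分大小写）
--     other_lines.sort(key=lambda s: s.strip())
--
--     # 保留所有原有的空行（仅含空白字符的行）
--     empty_lines: List[str] = [line for line in lines if not line.strip()]
--
--     # 综合固定顺序行、排序后的行和空行
--     return fixed_order + other_lines + empty_lines
-- ===== SOURCE B (Python) =====
-- from typing import List
--
-- def sort_lines(lines: List[str]) -> List[str]:
--     # One global stable sort with a composite (category, content) key:
--     # fixed-order lines first (stable, original order), then non-empty lines
--     # ordered by stripped content, then blank lines (stable, original order).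
--     def rank_key(line: str):
--         if line.startswith("._WndType=") or line.startswith("._Parent="):
--             return (0, "")
--         s = line.strip()
--         return (1, s) if s else (2, "")
--     return sorted(lines, key=rank_key)
-- ===== Notes on version B (the rewrite author's own statement) =====
-- stated objective: alternative
-- what changed: Replaces A's three filter passes (with an O(n*k) membership scan) plus a separate sort and concatenation by one global stable sort under a composite (category, stripped-content) key, relying on sort stability to keep fixed and blank lines in original order.
import Mathlib
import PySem

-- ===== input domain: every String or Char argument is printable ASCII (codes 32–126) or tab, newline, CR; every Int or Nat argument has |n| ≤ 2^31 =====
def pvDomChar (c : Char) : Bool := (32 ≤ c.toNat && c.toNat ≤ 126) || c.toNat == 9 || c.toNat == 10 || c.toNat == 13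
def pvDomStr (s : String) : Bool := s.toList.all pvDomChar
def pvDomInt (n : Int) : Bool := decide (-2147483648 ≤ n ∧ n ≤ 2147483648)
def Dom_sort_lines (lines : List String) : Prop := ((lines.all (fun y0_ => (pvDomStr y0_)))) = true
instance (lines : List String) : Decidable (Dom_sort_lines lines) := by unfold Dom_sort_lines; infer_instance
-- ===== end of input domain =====

-- B replaces A's three filter passes + sort + concatenation by one global stable sort under a composite (category, stripped-content) key; same return value proved.


-- ===== PORT A =====
-- the comprehension condition "line.startswith('._WndType=') or line.startswith('._Parent=')"
def pvIsFixed (line : String) : Bool :=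
  PySem.Str.startswith line "._WndType=" || PySem.Str.startswith line "._Parent="

def sort_lines (lines : List String) : List String :=
  let fixed_order := lines.filter (fun line => pvIsFixed line)
  let other_lines := lines.filter (fun line =>
    !(fixed_order.contains line) && !(PySem.Str.strip line == ""))
  let other_sorted := PySem.List.sorted other_lines (fun s => PySem.Str.strip s) false
  let empty_lines := lines.filter (fun line => PySem.Str.strip line == "")
  fixed_order ++ other_sorted ++ empty_lines

-- ===== PORT B =====
-- B's composite key rank_key(line) = (0,"") | (1, line.strip()) | (2,"")
def pvKey1 (line : String) : Int :=
  if pvIsFixed line then 0 else if !(PySem.Str.strip line == "") then 1 else 2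
def pvKey2 (line : String) : String :=
  if pvIsFixed line then "" else if !(PySem.Str.strip line == "") then PySem.Str.strip line else ""

def sort_lines_alt (lines : List String) : List String :=
  PySem.List.sorted2 lines pvKey1 pvKey2 false

-- ===== PRECONDITION & SPEC =====
def Spec_sort_lines (lines : List String) (out : List String) : Prop := out = sort_lines_alt lines
instance (lines : List String) (out : List String) : Decidable (Spec_sort_lines lines out) := by unfold Spec_sort_lines; infer_instance

-- ===== CLAIM (what is proved, stated in full; the proofs are below) =====
def Claim_equal_sort_lines : Prop := ∀ (lines : List String), Dom_sort_lines lines → Spec_sort_lines lines (sort_lines lines)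

-- ===== LEMMAS AND PROOFS =====

-- the lexicographic comparison sorted2 uses for B's tuple key
def pvLt2 (a b : String) : Bool :=
  decide (pvKey1 a < pvKey1 b) || (!decide (pvKey1 b < pvKey1 a) && decide (pvKey2 a < pvKey2 b))

-- the comparison A's inner sort (key = strip) uses
def pvLtS (a b : String) : Bool := decide (PySem.Str.strip a < PySem.Str.strip b)

-- the classification predicates over ranks
def pvR0 (l : String) : Bool := pvIsFixed l
def pvR1 (l : String) : Bool := !pvIsFixed l && !(PySem.Str.strip l == "")
def pvR2 (l : String) : Bool := !pvIsFixed l && (PySem.Str.strip l == "")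

-- a string containing a non-whitespace character has a non-empty strip
lemma chars_strip_ne_nil {cs : List Char} {c : Char} (hc : c ∈ cs)
    (hs : PySem.Chars.isspace c = false) : PySem.Chars.strip cs ≠ [] := by
  intro h
  unfold PySem.Chars.strip PySem.Chars.rstrip PySem.Chars.lstrip at h
  have h1 : List.dropWhile PySem.Chars.isspace
      (List.dropWhile PySem.Chars.isspace cs).reverse = [] := by
    simpa using h
  rw [List.dropWhile_eq_nil_iff] at h1
  have hsplit := List.takeWhile_append_dropWhile (p := PySem.Chars.isspace) (l := cs)
  rcases List.mem_append.mp (hsplit ▸ hc) with ht | hd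
  · exact absurd (List.mem_takeWhile_imp ht) (by simp [hs])
  · exact absurd (h1 c (List.mem_reverse.mpr hd)) (by simp [hs])

-- a fixed-order line starts with '.', hence its strip is non-empty
lemma strip_ne_empty_of_fixed {s : String} (h : pvIsFixed s = true) :
    (PySem.Str.strip s == "") = false := by
  have hdot : '.' ∈ s.toList := by
    have h2 : PySem.Str.startswith s "._WndType=" = true ∨ PySem.Str.startswith s "._Parent=" = true := by
      simpa [pvIsFixed] using h
    rcases h2 with h' | h' <;>
    · obtain ⟨t, ht⟩ := (PySem.Chars.startswith_iff _ _).mp (by simpa using h')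
      rw [← ht]
      exact List.mem_append_left _ (by decide)
  have hne : PySem.Chars.strip s.toList ≠ [] :=
    chars_strip_ne_nil hdot (by decide)
  have : PySem.Str.strip s ≠ "" := by
    intro he
    apply hne
    have := congrArg String.toList he
    simpa using this
  simpa using this

-- rank-0 lines compare below nothing of rank 0, above everything of rank 1/2, etc.
lemma pvLt2_of_key1_lt {a b : String} (h : pvKey1 a < pvKey1 b) : pvLt2 a b = true := by
  simp [pvLt2, h]

lemma pvLt2_false_of_key1_gt {a b : String} (h : pvKey1 b < pvKey1 a) : pvLt2 a b = false := by
  simp [pvLt2, h, not_lt_of_gt h]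

lemma pvKey1_of_fixed {a : String} (h : pvIsFixed a = true) : pvKey1 a = 0 := by
  simp [pvKey1, h]

lemma pvKey1_of_other {a : String} (h1 : pvIsFixed a = false)
    (h2 : (PySem.Str.strip a == "") = false) : pvKey1 a = 1 := by
  simp [pvKey1, h1, h2]

lemma pvKey1_of_empty {a : String} (h1 : pvIsFixed a = false)
    (h2 : (PySem.Str.strip a == "") = true) : pvKey1 a = 2 := by
  simp [pvKey1, h1, h2]

-- ties at rank 0 and rank 2 never swap (second key is "")
lemma pvLt2_false_same_rank02 {a b : String} (hb : pvKey2 b = "")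
    (h : pvKey1 a = pvKey1 b) : pvLt2 a b = false := by
  simp [pvLt2, h, hb]

-- decompose the rank-1 / rank-2 classification predicates
lemma pvR1_split {y : String} (h : pvR1 y = true) :
    pvIsFixed y = false ∧ (PySem.Str.strip y == "") = false := by
  revert h; unfold pvR1
  cases pvIsFixed y <;> cases PySem.Str.strip y == "" <;> simp

lemma pvR2_split {y : String} (h : pvR2 y = true) :
    pvIsFixed y = false ∧ (PySem.Str.strip y == "") = true := by
  revert h; unfold pvR2
  cases pvIsFixed y <;> cases PySem.Str.strip y == "" <;> simp

lemma pvKey2_of_fixed {a : String} (h : pvIsFixed a = true) : pvKey2 a = "" := by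
  simp [pvKey2, h]

lemma pvKey2_of_empty {a : String} (h1 : pvIsFixed a = false)
    (h2 : (PySem.Str.strip a == "") = true) : pvKey2 a = "" := by
  simp [pvKey2, h1, h2]

-- at rank 1 the composite comparison is exactly the strip comparison
lemma pvLt2_rank1 {a b : String} (ha1 : pvIsFixed a = false) (ha2 : (PySem.Str.strip a == "") = false)
    (hb1 : pvIsFixed b = false) (hb2 : (PySem.Str.strip b == "") = false) :
    pvLt2 a b = pvLtS a b := by
  simp [pvLt2, pvLtS, pvKey1, pvKey2, ha1, ha2, hb1, hb2]

-- insertBy passes over a prefix it never inserts before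
lemma insertBy_append_left {α : Type} (before : α → α → Bool) (x : α) (F rest : List α)
    (h : ∀ y ∈ F, before x y = false) :
    PySem.List.insertBy before x (F ++ rest) = F ++ PySem.List.insertBy before x rest := by
  induction F with
  | nil => simp
  | cons f fs ih =>
    have hf : before x f = false := h f (List.mem_cons_self)
    simp [PySem.List.insertBy, hf, ih (fun y hy => h y (List.mem_cons_of_mem f hy))]

-- insertion into M ++ E stays inside M when x sorts before every element of E
lemma insertBy_append_right {α : Type} (before before' : α → α → Bool) (x : α) (M E : List α)
    (hM : ∀ y ∈ M, before x y = before' x y) (hE : ∀ y ∈ E, before x y = true) :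
    PySem.List.insertBy before x (M ++ E) = PySem.List.insertBy before' x M ++ E := by
  induction M with
  | nil =>
    cases E with
    | nil => simp [PySem.List.insertBy]
    | cons e es =>
      have he : before x e = true := hE e (List.mem_cons_self)
      simp [PySem.List.insertBy, he]
  | cons m ms ih =>
    have hm : before x m = before' x m := hM m (List.mem_cons_self)
    by_cases h : before' x m = true
    · simp [PySem.List.insertBy, hm, h]
    · have h' : before' x m = false := by simpa using h
      simp [PySem.List.insertBy, hm, h',
        ih (fun y hy => hM y (List.mem_cons_of_mem m hy))]

-- loop invariant: inserting with the composite key into F ++ M ++ E (ranks 0/1/2)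
-- appends rank-0 lines to F, insertion-sorts rank-1 lines into M, appends rank-2 lines to E
lemma sorted2_loop (lines : List String) (F M E : List String)
    (hF : ∀ y ∈ F, pvR0 y = true) (hM : ∀ y ∈ M, pvR1 y = true) (hE : ∀ y ∈ E, pvR2 y = true) :
    lines.foldl (fun acc x => PySem.List.insertBy pvLt2 x acc) (F ++ M ++ E) =
      (F ++ lines.filter pvR0) ++
      ((lines.filter pvR1).foldl (fun acc x => PySem.List.insertBy pvLtS x acc) M) ++
      (E ++ lines.filter pvR2) := by
  induction lines generalizing F M E with
  | nil => simp
  | cons x xs ih =>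
    have key1F : ∀ y ∈ F, pvKey1 y = 0 := fun y hy => pvKey1_of_fixed (hF y hy)
    have key1M : ∀ y ∈ M, pvKey1 y = 1 := fun y hy =>
      pvKey1_of_other (pvR1_split (hM y hy)).1 (pvR1_split (hM y hy)).2
    have key1E : ∀ y ∈ E, pvKey1 y = 2 := fun y hy =>
      pvKey1_of_empty (pvR2_split (hE y hy)).1 (pvR2_split (hE y hy)).2
    by_cases hx0 : pvIsFixed x = true
    · -- rank 0: x lands at the end of F
      have hxk : pvKey1 x = 0 := pvKey1_of_fixed hx0
      have hins : PySem.List.insertBy pvLt2 x (F ++ M ++ E) = (F ++ [x]) ++ M ++ E := by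
        rw [List.append_assoc, insertBy_append_left pvLt2 x F (M ++ E)
          (fun y hy => pvLt2_false_same_rank02 (pvKey2_of_fixed (hF y hy)) (by rw [hxk, key1F y hy]))]
        cases hme : M ++ E with
        | nil => simp [hme, PySem.List.insertBy]
        | cons z zs =>
          have hz : pvKey1 x < pvKey1 z := by
            rcases List.mem_append.mp (hme ▸ List.mem_cons_self) with h | h
            · rw [hxk, key1M z h]; norm_num
            · rw [hxk, key1E z h]; norm_num
          simp [hme, PySem.List.insertBy, pvLt2_of_key1_lt hz, List.append_assoc]
      have hfil0 : (x :: xs).filter pvR0 = x :: xs.filter pvR0 := by simp [pvR0, hx0]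
      have hfil1 : (x :: xs).filter pvR1 = xs.filter pvR1 := by simp [pvR1, hx0]
      have hfil2 : (x :: xs).filter pvR2 = xs.filter pvR2 := by simp [pvR2, hx0]
      rw [List.foldl_cons, hins, ih (F ++ [x]) M E
        (by intro y hy; rcases List.mem_append.mp hy with h | h
            · exact hF y h
            · simp [pvR0, List.mem_singleton.mp h, hx0]) hM hE,
        hfil0, hfil1, hfil2]
      simp [List.append_assoc]
    · have hx0' : pvIsFixed x = false := by simpa using hx0
      by_cases hxs : (PySem.Str.strip x == "") = true
      · -- rank 2: x lands at the very end
        have hxk : pvKey1 x = 2 := pvKey1_of_empty hx0' hxs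
        have hins : PySem.List.insertBy pvLt2 x (F ++ M ++ E) = F ++ M ++ (E ++ [x]) := by
          rw [PySem.List.insertBy_of_forall_not_before]
          · simp [List.append_assoc]
          · intro y hy
            rcases List.mem_append.mp hy with h | h
            · rcases List.mem_append.mp h with h' | h'
              · exact pvLt2_false_of_key1_gt (by rw [hxk, key1F y h']; norm_num)
              · exact pvLt2_false_of_key1_gt (by rw [hxk, key1M y h']; norm_num)
            · exact pvLt2_false_same_rank02
                (pvKey2_of_empty (pvR2_split (hE y h)).1 (pvR2_split (hE y h)).2)
                (by rw [hxk, key1E y h])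
        have hfil0 : (x :: xs).filter pvR0 = xs.filter pvR0 := by simp [pvR0, hx0']
        have hfil1 : (x :: xs).filter pvR1 = xs.filter pvR1 := by simp [pvR1, hx0', hxs]
        have hfil2 : (x :: xs).filter pvR2 = x :: xs.filter pvR2 := by simp [pvR2, hx0', hxs]
        rw [List.foldl_cons, hins, ih F M (E ++ [x]) hF hM
          (by intro y hy; rcases List.mem_append.mp hy with h | h
              · exact hE y h
              · simp [pvR2, List.mem_singleton.mp h, hx0', hxs]),
          hfil0, hfil1, hfil2]
        simp [List.append_assoc]
      · -- rank 1: x is insertion-sorted into M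
        have hxs' : (PySem.Str.strip x == "") = false := by simpa using hxs
        have hxk : pvKey1 x = 1 := pvKey1_of_other hx0' hxs'
        have hins : PySem.List.insertBy pvLt2 x (F ++ M ++ E) =
            F ++ PySem.List.insertBy pvLtS x M ++ E := by
          rw [List.append_assoc, insertBy_append_left pvLt2 x F (M ++ E)
            (fun y hy => pvLt2_false_of_key1_gt (by rw [hxk, key1F y hy]; norm_num)),
            insertBy_append_right pvLt2 pvLtS x M E
              (fun y hy =>
                pvLt2_rank1 hx0' hxs' (pvR1_split (hM y hy)).1 (pvR1_split (hM y hy)).2)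
              (fun y hy => pvLt2_of_key1_lt (by rw [hxk, key1E y hy]; norm_num)),
            List.append_assoc]
        have hfil0 : (x :: xs).filter pvR0 = xs.filter pvR0 := by simp [pvR0, hx0']
        have hfil1 : (x :: xs).filter pvR1 = x :: xs.filter pvR1 := by simp [pvR1, hx0', hxs']
        have hfil2 : (x :: xs).filter pvR2 = xs.filter pvR2 := by simp [pvR2, hx0', hxs']
        rw [List.foldl_cons, hins, ih F (PySem.List.insertBy pvLtS x M) E hF
          (by intro y hy
              rcases (PySem.List.mem_insertBy pvLtS x y M).mp hy with h | h
              · subst h; simp [pvR1, hx0', hxs']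
              · exact hM y h) hE,
          hfil0, hfil1, hfil2]
        simp [List.foldl_cons]

-- 'line not in fixed_order' is exactly 'does not start with either prefix'
lemma contains_filter_fixed (lines : List String) (x : String) (hx : x ∈ lines) :
    (lines.filter (fun l => pvIsFixed l)).contains x = pvIsFixed x := by
  by_cases hp : pvIsFixed x
  · simp [List.mem_filter, hx, hp]
  · simp [List.mem_filter, hp]

lemma other_filter_eq (lines : List String) :
    lines.filter (fun line =>
        !((lines.filter (fun l => pvIsFixed l)).contains line) && !(PySem.Str.strip line == "")) =
      lines.filter pvR1 := by
  apply List.filter_congr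
  intro x hx
  unfold pvR1
  rw [contains_filter_fixed lines x hx]

lemma empty_filter_eq (lines : List String) :
    lines.filter (fun line => PySem.Str.strip line == "") = lines.filter pvR2 := by
  apply List.filter_congr
  intro x _
  by_cases he : (PySem.Str.strip x == "")
  · have hp : pvIsFixed x = false := by
      by_contra h
      rw [strip_ne_empty_of_fixed (by simpa using h)] at he
      exact absurd he (by simp)
    simp [pvR2, he, hp]
  · simp [pvR2, he]

-- ===== VERDICT (by name: the statement is the Claim_ definition above) =====
theorem sort_lines_spec : Claim_equal_sort_lines := by
  intro lines _
  have h := sorted2_loop lines [] [] [] (by simp) (by simp) (by simp)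
  simp only [List.append_nil, List.nil_append] at h
  show sort_lines lines = sort_lines_alt lines
  have hB : sort_lines_alt lines =
      (lines.filter pvR0) ++
        ((lines.filter pvR1).foldl (fun acc x => PySem.List.insertBy pvLtS x acc) []) ++
        (lines.filter pvR2) :=
    (show sort_lines_alt lines =
        lines.foldl (fun acc x => PySem.List.insertBy pvLt2 x acc) [] from rfl).trans h
  have hsort : (lines.filter pvR1).foldl (fun acc x => PySem.List.insertBy pvLtS x acc) [] =
      PySem.List.sorted (lines.filter pvR1) (fun s => PySem.Str.strip s) false :=
    (PySem.List.sorted_eq_foldl_insertBy _ _).symm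
  rw [hB, hsort, ← other_filter_eq, ← empty_filter_eq]
  rfl
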